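-- pv_equiv track=rewrite | github.com/Ibrahem-Ali-99/VocalMind | services/rag/ingest.py | _repair_orphaned_table_rows
-- ===== SOURCE A (Python) =====
-- def _repair_orphaned_table_rows(text: str) -> str:
--     """Re-attach pipe-table rows separated from their table by blank lines."""
--     lines = text.splitlines()
--     output: list[str] = []
--     i = 0
--     while i < len(lines):
--         output.append(lines[i])
--         if lines[i].strip().startswith("|"):
--             j = i + 1
--             while j < len(lines) and lines[j].strip() == "":
--                 j += 1
--             if j < len(lines) and lines[j].strip().startswith("|"):
--                 i = j
--                 continue
--         i += 1
--     return "\n".join(output)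
-- ===== SOURCE B (Python) =====
-- def _repair_orphaned_table_rows(text: str) -> str:
--     """Single forward pass: buffer blank lines, drop them between pipe rows."""
--     output: list[str] = []
--     pending_blanks: list[str] = []
--     last_was_pipe = False
--     for line in text.splitlines():
--         stripped = line.strip()
--         if stripped == "":
--             pending_blanks.append(line)
--         else:
--             if not (last_was_pipe and stripped.startswith("|")):
--                 output.extend(pending_blanks)
--             pending_blanks = []
--             output.append(line)
--             last_was_pipe = stripped.startswith("|")
--     output.extend(pending_blanks)
--     return "\n".join(output)
-- ===== Notes on version B (the rewrite author's own statement) =====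
-- stated objective: alternative
-- what changed: Replaced A's index-based while loop with lookahead rescanning (inner j-scan over blank runs, 'continue' jumps) by a single forward fold that buffers pending blank lines and a last-was-pipe flag, discarding or flushing the buffer at the next non-blank line.
import Mathlib
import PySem

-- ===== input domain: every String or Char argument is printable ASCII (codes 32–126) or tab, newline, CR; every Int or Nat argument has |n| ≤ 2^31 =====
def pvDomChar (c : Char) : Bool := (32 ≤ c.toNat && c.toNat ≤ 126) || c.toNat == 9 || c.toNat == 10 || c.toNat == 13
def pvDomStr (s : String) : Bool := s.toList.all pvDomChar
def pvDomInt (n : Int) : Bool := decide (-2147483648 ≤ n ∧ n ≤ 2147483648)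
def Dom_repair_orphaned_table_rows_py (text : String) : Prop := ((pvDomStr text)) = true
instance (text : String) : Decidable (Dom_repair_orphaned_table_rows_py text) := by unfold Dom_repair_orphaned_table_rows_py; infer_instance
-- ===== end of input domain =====

-- B replaces A's lookahead rescanning (inner scan over blank runs + 'continue' jump) by one
-- forward fold with a pending-blanks buffer and a last-was-pipe flag; same O(n) cost, no speed claim.

-- ===== PORT A =====
-- line.strip() == ""  (shared expression of both sources)
def pvBlank (l : String) : Bool := PySem.Str.strip l == ""
-- line.strip().startswith("|")
def pvPipe (l : String) : Bool := PySem.Str.startswith (PySem.Str.strip l) "|"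

-- inner while: j advances over blank lines; here: the remaining suffix after the blanks
def pvSkipBlanksA : List String → List String
  | [] => []
  | l :: rest => if pvBlank l then pvSkipBlanksA rest else l :: rest

lemma pvSkipBlanksA_length_le (ls : List String) : (pvSkipBlanksA ls).length ≤ ls.length := by
  induction ls with
  | nil => simp [pvSkipBlanksA]
  | cons l rest ih =>
    simp only [pvSkipBlanksA]
    split
    · exact Nat.le_succ_of_le ih
    · simp

-- outer while over index i; state: output so far, remaining suffix lines[i:]
def pvLoopA (out : List String) : List String → List String
  | [] => out
  | l :: rest =>
    let out2 := out ++ [l]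
    if pvPipe l then
      match h : pvSkipBlanksA rest with
      | l2 :: rest2 =>
        if pvPipe l2 then pvLoopA out2 (l2 :: rest2) else pvLoopA out2 rest
      | [] => pvLoopA out2 rest
    else pvLoopA out2 rest
termination_by ls => ls.length
decreasing_by
  · have := pvSkipBlanksA_length_le rest
    rw [h] at this
    simpa using Nat.lt_succ_of_le this
  · simp
  · simp
  · simp

def repair_orphaned_table_rows_py (text : String) : String :=
  PySem.Str.join "\n" (pvLoopA [] (PySem.Str.splitlines text))

-- ===== PORT B =====
-- one step of Source B's for-loop; state = (output, pending_blanks, last_was_pipe)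
def pvStepB (st : List String × List String × Bool) (line : String) :
    List String × List String × Bool :=
  let stripped := PySem.Str.strip line
  if stripped == "" then
    (st.1, st.2.1 ++ [line], st.2.2)
  else
    let out := if st.2.2 && PySem.Str.startswith stripped "|" then st.1 else st.1 ++ st.2.1
    (out ++ [line], [], PySem.Str.startswith stripped "|")

def repair_orphaned_table_rows_py_alt (text : String) : String :=
  let st := (PySem.Str.splitlines text).foldl pvStepB ([], [], false)
  PySem.Str.join "\n" (st.1 ++ st.2.1)

-- ===== PRECONDITION & SPEC =====
def Spec_repair_orphaned_table_rows_py (text : String) (out : String) : Prop := out = repair_orphaned_table_rows_py_alt text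
instance (text : String) (out : String) : Decidable (Spec_repair_orphaned_table_rows_py text out) := by unfold Spec_repair_orphaned_table_rows_py; infer_instance

-- ===== CLAIM (what is proved, stated in full; the proofs are below) =====
def Claim_equal_repair_orphaned_table_rows_py : Prop := ∀ (text : String), Dom_repair_orphaned_table_rows_py text → Spec_repair_orphaned_table_rows_py text (repair_orphaned_table_rows_py text)

-- ===== LEMMAS AND PROOFS =====

-- final flush: output.extend(pending_blanks)
def pvFin (st : List String × List String × Bool) : List String := st.1 ++ st.2.1

-- a blank line cannot start with "|"
lemma pvBlank_not_pipe {l : String} (h : pvBlank l = true) : pvPipe l = false := by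
  have hs : PySem.Str.strip l = "" := by simpa [pvBlank] using h
  simp [pvPipe, hs]
  decide

lemma pvSkipBlanksA_head {ls : List String} {l2 : String} {r2 : List String}
    (h : pvSkipBlanksA ls = l2 :: r2) : pvBlank l2 = false := by
  induction ls with
  | nil => simp [pvSkipBlanksA] at h
  | cons l rest ih =>
    simp only [pvSkipBlanksA] at h
    by_cases hb : pvBlank l
    · rw [if_pos hb] at h; exact ih h
    · rw [if_neg hb] at h
      cases h
      simpa using hb

lemma pvSkipBlanksA_decomp (ls : List String) :
    ∃ bs, ls = bs ++ pvSkipBlanksA ls ∧ ∀ b ∈ bs, pvBlank b = true := by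
  induction ls with
  | nil => exact ⟨[], by simp [pvSkipBlanksA]⟩
  | cons l rest ih =>
    by_cases hb : pvBlank l
    · obtain ⟨bs, h1, h2⟩ := ih
      refine ⟨l :: bs, ?_, ?_⟩
      · simp [pvSkipBlanksA, hb]; exact h1
      · intro b hb'
        rcases List.mem_cons.mp hb' with rfl | hmem
        · exact hb
        · exact h2 b hmem
    · exact ⟨[], by simp [pvSkipBlanksA, hb]⟩

-- B's fold over a run of blank lines just extends the buffer
lemma pvFold_blanks (bs : List String) (h : ∀ b ∈ bs, pvBlank b = true) :
    ∀ out pend lp, bs.foldl pvStepB (out, pend, lp) = (out, pend ++ bs, lp) := by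
  induction bs with
  | nil => intro out pend lp; simp
  | cons b rest ih =>
    intro out pend lp
    have hb : pvBlank b = true := h b (List.mem_cons_self ..)
    have hb' : (PySem.Str.strip b == "") = true := hb
    simp only [List.foldl_cons, pvStepB, hb', if_pos]
    rw [ih (fun x hx => h x (List.mem_cons_of_mem _ hx))]
    simp

-- A appends a run of blank lines unchanged
lemma pvLoopA_blanks (bs : List String) (h : ∀ b ∈ bs, pvBlank b = true) :
    ∀ xs out, pvLoopA out (bs ++ xs) = pvLoopA (out ++ bs) xs := by
  induction bs with
  | nil => intro xs out; simp
  | cons b rest ih =>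
    intro xs out
    have hb : pvBlank b = true := h b (List.mem_cons_self ..)
    have hp : pvPipe b = false := pvBlank_not_pipe hb
    rw [List.cons_append, pvLoopA, if_neg (by simp [hp])]
    rw [ih (fun x hx => h x (List.mem_cons_of_mem _ hx))]
    simp

-- with last_was_pipe = false the buffer is flushed either way
lemma pvFold_flush_false (ls : List String) :
    ∀ out pend, pvFin (ls.foldl pvStepB (out, pend, false)) =
      pvFin (ls.foldl pvStepB (out ++ pend, [], false)) := by
  induction ls with
  | nil => intro out pend; simp [pvFin]
  | cons l rest ih =>
    intro out pend
    by_cases hb : (PySem.Str.strip l == "") = true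
    · simp only [List.foldl_cons, pvStepB, hb, if_pos, List.nil_append]
      rw [ih out (pend ++ [l]), ih (out ++ pend) [l]]
      simp
    · simp only [List.foldl_cons, pvStepB, hb, Bool.false_and]
      simp only [Bool.false_eq_true, if_false]
      rw [List.append_assoc]
      simp

-- A = B is provable only when, whenever last_was_pipe would be true, the current
-- suffix does not begin with a dropped-blank run followed by a pipe row that A has
-- not already consumed; pvOk states the shapes reachable with lp = true.
def pvOk : List String → Prop
  | [] => True
  | l :: rest =>
      pvBlank l = false ∨
      (match pvSkipBlanksA (l :: rest) with
       | [] => True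
       | l2 :: _ => pvPipe l2 = false)

lemma pvMainAux : ∀ n (ls : List String) (out : List String) (lp : Bool),
    ls.length ≤ n → (lp = true → pvOk ls) →
    pvLoopA out ls = pvFin (ls.foldl pvStepB (out, [], lp)) := by
  intro n
  induction n with
  | zero =>
    intro ls out lp hlen _
    have : ls = [] := List.eq_nil_of_length_eq_zero (Nat.le_zero.mp hlen)
    subst this
    simp [pvLoopA, pvFin]
  | succ n ih =>
    intro ls out lp hlen hok
    cases ls with
    | nil => simp [pvLoopA, pvFin]
    | cons l rest =>
      have hrest : rest.length ≤ n := Nat.le_of_succ_le_succ hlen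
      by_cases hb : pvBlank l
      · -- blank line: A appends it; B buffers it
        have hp : pvPipe l = false := pvBlank_not_pipe hb
        have hb' : (PySem.Str.strip l == "") = true := hb
        rw [pvLoopA, if_neg (by simp [hp])]
        simp only [List.foldl_cons, pvStepB, hb', if_pos]
        cases lp with
        | false =>
          rw [pvFold_flush_false]
          simp only [List.nil_append]
          exact ih rest (out ++ [l]) false hrest (by simp)
        | true =>
          have hok' := hok rfl
          simp only [pvOk, hb, Bool.true_eq_false, false_or] at hok'
          obtain ⟨bs, hdec, hbs⟩ := pvSkipBlanksA_decomp rest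
          have hskip : pvSkipBlanksA (l :: rest) = pvSkipBlanksA rest := by
            simp [pvSkipBlanksA, hb]
          rw [hskip] at hok'
          cases htail : pvSkipBlanksA rest with
          | nil =>
            rw [htail] at hdec hok'
            rw [hdec, pvLoopA_blanks bs hbs, List.foldl_append, pvFold_blanks bs hbs]
            simp [pvLoopA, pvFin]
          | cons l2 r2 =>
            rw [htail] at hok' hdec
            rw [hdec, pvLoopA_blanks bs hbs, List.foldl_append, pvFold_blanks bs hbs]
            have hnb2 : pvBlank l2 = false := pvSkipBlanksA_head htail
            have hnp2 : pvPipe l2 = false := hok'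
            have hnb2' : (PySem.Str.strip l2 == "") = false := hnb2
            have hnp2' : PySem.Str.startswith (PySem.Str.strip l2) "|" = false := hnp2
            rw [pvLoopA, if_neg (by simp [hnp2])]
            simp only [List.foldl_cons, pvStepB, hnb2', Bool.false_eq_true, if_false,
              hnp2', Bool.and_false, List.nil_append]
            have hr2 : r2.length ≤ n := by
              have : rest.length = bs.length + r2.length + 1 := by
                rw [hdec]; simp; omega
              omega
            rw [ih r2 (out ++ [l] ++ bs ++ [l2]) false hr2 (by simp)]
            simp [List.append_assoc]
      · -- non-blank line: B flushes (empty) buffer; A may look ahead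
        have hbF : pvBlank l = false := by simpa using hb
        have hb' : (PySem.Str.strip l == "") = false := hbF
        simp only [List.foldl_cons, pvStepB, hb', Bool.false_eq_true, if_false,
          List.append_nil, List.nil_append]
        rw [ite_self]
        by_cases hp : pvPipe l
        · have hp' : PySem.Str.startswith (PySem.Str.strip l) "|" = true := hp
          rw [pvLoopA, if_pos hp]
          split
          next l2 r2 htail =>
            by_cases hp2 : pvPipe l2
            · rw [if_pos hp2]
              obtain ⟨bs, hdec, hbs⟩ := pvSkipBlanksA_decomp rest
              rw [htail] at hdec
              have htlen : (l2 :: r2).length ≤ n := by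
                have h1 := pvSkipBlanksA_length_le rest
                rw [htail] at h1
                omega
              rw [ih (l2 :: r2) (out ++ [l]) true htlen
                (fun _ => Or.inl (pvSkipBlanksA_head htail))]
              rw [hdec, List.foldl_append, pvFold_blanks bs hbs]
              have hnb2' : (PySem.Str.strip l2 == "") = false := pvSkipBlanksA_head htail
              have hp2' : PySem.Str.startswith (PySem.Str.strip l2) "|" = true := hp2
              simp only [List.foldl_cons, pvStepB, hnb2', Bool.false_eq_true, if_false,
                hp2', Bool.and_true, hp', if_pos, List.nil_append]
            · rw [if_neg hp2]
              refine ih rest (out ++ [l]) (pvPipe l) hrest ?_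
              intro _
              cases rest with
              | nil => trivial
              | cons b r =>
                right
                rw [htail]
                simpa using hp2
          next htail =>
            refine ih rest (out ++ [l]) (pvPipe l) hrest ?_
            intro _
            cases rest with
            | nil => trivial
            | cons b r =>
              right
              rw [htail]
              trivial
        · rw [pvLoopA, if_neg hp]
          exact ih rest (out ++ [l]) (pvPipe l) hrest (fun h => absurd h (by simp [hp]))

-- ===== VERDICT (by name: the statement is the Claim_ definition above) =====
theorem repair_orphaned_table_rows_py_spec : Claim_equal_repair_orphaned_table_rows_py := by
  intro text _
  unfold Spec_repair_orphaned_table_rows_py repair_orphaned_table_rows_py repair_orphaned_table_rows_py_alt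
  rw [pvMainAux (PySem.Str.splitlines text).length _ [] false le_rfl (by simp)]
  rfl
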